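-- pv_equiv track=rewrite | github.com/shekhartata/querySmith | querysmith/pipeline_parse.py | validate_paths_against_schema
-- ===== SOURCE A (Python) =====
-- def _path_exists_in_schema(path: str, schema_paths: set[str]) -> bool:
--     if path in schema_paths:
--         return True
--     for k in schema_paths:
--         if k.startswith(path + "."):
--             return True
--     parts = path.split(".")
--     for i in range(len(parts) - 1):
--         parent = ".".join(parts[: i + 1])
--         if parent in schema_paths:
--             return True
--     return False
--
-- def validate_paths_against_schema(paths: set[str], schema_paths: set[str]) -> list[str]:
--     missing: list[str] = []
--     for p in sorted(paths):
--         if not p or p.startswith("$"):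
--             continue
--         if _path_exists_in_schema(p, schema_paths):
--             continue
--         missing.append(p)
--     return missing
-- ===== SOURCE B (Python) =====
-- def validate_paths_against_schema(paths, schema_paths):
--     schema = set(schema_paths)
--     # "covered" = every schema path plus every dot-boundary prefix of a schema path:
--     # p is covered iff p is in the schema or some schema path lies strictly below p.
--     covered = set()
--     for s in schema_paths:
--         for i, c in enumerate(s):
--             if c == ".":
--                 covered.add(s[:i])
--         covered.add(s)
--     missing = []
--     for p in sorted(paths):
--         if not p or p.startswith("$"):
--             continue
--         if p in covered:
--             continue
--         if any(p[:i] in schema for i, c in enumerate(p) if c == "."):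
--             continue
--         missing.append(p)
--     return missing
-- ===== Notes on version B (the rewrite author's own statement) =====
-- stated objective: faster
-- what changed: Instead of scanning all schema paths per query (plus a split/join parent walk), B precomputes once a hash set of every schema path together with all its dot-boundary prefixes, so each query is answered by O(L) set lookups.
import Mathlib
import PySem

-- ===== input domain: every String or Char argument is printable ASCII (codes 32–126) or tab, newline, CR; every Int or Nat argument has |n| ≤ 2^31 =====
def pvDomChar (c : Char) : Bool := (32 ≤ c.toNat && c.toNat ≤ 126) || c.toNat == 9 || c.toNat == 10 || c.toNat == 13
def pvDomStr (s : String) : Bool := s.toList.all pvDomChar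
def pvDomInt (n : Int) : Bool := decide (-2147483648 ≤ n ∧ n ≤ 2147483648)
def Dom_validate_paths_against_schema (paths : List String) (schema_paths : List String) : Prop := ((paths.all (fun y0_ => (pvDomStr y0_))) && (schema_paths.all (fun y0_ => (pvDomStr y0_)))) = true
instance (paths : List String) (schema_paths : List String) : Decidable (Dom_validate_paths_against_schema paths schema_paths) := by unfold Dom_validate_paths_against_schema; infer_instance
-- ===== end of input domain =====

-- ===== PORT A =====
-- B precomputes the schema's dot-boundary prefix set once, replacing A's per-query scan of all schema paths.
def pathExistsInSchema (path : String) (schema_paths : List String) : Bool :=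
  if schema_paths.contains path then true
  else if schema_paths.any (fun k => PySem.Str.startswith k (path ++ ".")) then true
  else
    let parts : List String := (PySem.Chars.splitOn path.toList ['.']).map String.ofList
    (PySem.List.pyRange 0 ((parts.length : Int) - 1) 1).any (fun i =>
      schema_paths.contains (PySem.Str.join "." (PySem.List.slice parts none (some (i + 1)))))

def validate_paths_against_schema (paths : List String) (schema_paths : List String) : List String :=
  (PySem.List.sorted paths (fun x => x) false).foldl (fun missing p =>
    if p = "" || PySem.Str.startswith p "$" then missing
    else if pathExistsInSchema p schema_paths then missing
    else missing ++ [p]) []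

-- ===== PORT B =====
def coveredOf (schema_paths : List String) : PySem.Set String :=
  schema_paths.foldl (fun cov s =>
    ((PySem.List.enumerate s.toList).foldl (fun cov ic =>
        if ic.2 = '.' then cov.add (String.ofList (PySem.List.slice s.toList none (some ic.1))) else cov)
      cov).add s)
    PySem.Set.empty

def validate_paths_against_schema_alt (paths : List String) (schema_paths : List String) : List String :=
  let schema : PySem.Set String := PySem.Set.ofList schema_paths
  let covered : PySem.Set String := coveredOf schema_paths
  (PySem.List.sorted paths (fun x => x) false).foldl (fun missing p =>
    if p = "" || PySem.Str.startswith p "$" then missing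
    else if covered.contains p then missing
    else if (PySem.List.enumerate p.toList).any (fun ic =>
        ic.2 == '.' && schema.contains (String.ofList (PySem.List.slice p.toList none (some ic.1)))) then missing
    else missing ++ [p]) []

-- ===== PRECONDITION & SPEC =====
def Spec_validate_paths_against_schema (paths : List String) (schema_paths : List String) (out : List String) : Prop := out = validate_paths_against_schema_alt paths schema_paths
instance (paths : List String) (schema_paths : List String) (out : List String) : Decidable (Spec_validate_paths_against_schema paths schema_paths out) := by unfold Spec_validate_paths_against_schema; infer_instance

-- ===== CLAIM (what is proved, stated in full; the proofs are below) =====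
def Claim_equal_validate_paths_against_schema : Prop := ∀ (paths : List String) (schema_paths : List String), Dom_validate_paths_against_schema paths schema_paths → Spec_validate_paths_against_schema paths schema_paths (validate_paths_against_schema paths schema_paths)

-- ===== LEMMAS AND PROOFS =====

-- a clean structural recursion computing split on a single-character separator
def dsplit (c : Char) : List Char → List (List Char)
  | [] => [[]]
  | a :: rest =>
      if a = c then [] :: dsplit c rest
      else match dsplit c rest with
           | p :: ps => (a :: p) :: ps
           | [] => [[a]]

lemma dsplit_ne_nil (c : Char) (cs : List Char) : dsplit c cs ≠ [] := by
  cases cs with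
  | nil => simp [dsplit]
  | cons a rest =>
    by_cases h : a = c
    · simp [dsplit, h]
    · rcases hD : dsplit c rest with _ | ⟨p, ps⟩ <;> simp [dsplit, h, hD]

lemma go_eq_dsplit (c : Char) : ∀ (fuel : Nat) (l cur : List Char) (acc : List (List Char)),
    l.length < fuel →
    PySem.Chars.splitOn.go [c] fuel l cur acc
      = acc.reverse ++ (match dsplit c l with
                        | p :: ps => (cur.reverse ++ p) :: ps
                        | [] => []) := by
  intro fuel
  induction fuel with
  | zero => intro l cur acc h; exact absurd h (Nat.not_lt_zero _)
  | succ n ih =>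
    intro l cur acc h
    cases l with
    | nil =>
      rw [PySem.Chars.splitOn.go.eq_def]
      simp [dsplit]
    | cons a rest =>
      have hlen : rest.length < n := by simp at h; omega
      rw [PySem.Chars.splitOn.go.eq_def]
      by_cases hac : a = c
      · subst hac
        have hpre : [a].isPrefixOf (a :: rest) = true := by simp [List.isPrefixOf]
        simp only [hpre, if_true, List.length_cons, List.length_nil, List.drop_succ_cons,
          List.drop_zero]
        rw [ih rest [] (cur.reverse :: acc) hlen]
        rcases hD : dsplit a rest with _ | ⟨p, ps⟩
        · exact absurd hD (dsplit_ne_nil a rest)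
        · simp [dsplit, hD]
      · have hpre : [c].isPrefixOf (a :: rest) = false := by
          simp [List.isPrefixOf]
          intro hh
          exact absurd hh.symm hac
        simp only [hpre, Bool.false_eq_true, if_false]
        rw [ih rest (a :: cur) acc hlen]
        rcases hD : dsplit c rest with _ | ⟨p, ps⟩
        · exact absurd hD (dsplit_ne_nil c rest)
        · simp [dsplit, hac, hD]

lemma splitOn_eq_dsplit (c : Char) (cs : List Char) :
    PySem.Chars.splitOn cs [c] = dsplit c cs := by
  unfold PySem.Chars.splitOn
  rw [go_eq_dsplit c (cs.length + 1) cs [] [] (by omega)]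
  rcases hD : dsplit c cs with _ | ⟨p, ps⟩
  · exact absurd hD (dsplit_ne_nil c cs)
  · simp

lemma append_singleton_prefix_iff (q t : List Char) (c : Char) :
    (q ++ [c]) <+: t ↔ ∃ i, i < t.length ∧ t[i]? = some c ∧ q = t.take i := by
  constructor
  · rintro ⟨r, rfl⟩
    refine ⟨q.length, by simp, ?_, ?_⟩
    · rw [List.append_assoc, List.getElem?_append_right (le_refl _)]
      simp
    · rw [List.append_assoc, List.take_left]
  · rintro ⟨i, hi, hget, rfl⟩
    have h1 : t.take (i + 1) = t.take i ++ [c] := by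
      rw [List.take_succ, hget]
      rfl
    rw [← h1]
    exact List.take_prefix _ _

lemma join_take_cons_cons (c a : Char) (p : List Char) (ps : List (List Char)) (j : Nat) :
    PySem.Chars.join [c] (((a :: p) :: ps).take (j + 1))
      = a :: PySem.Chars.join [c] ((p :: ps).take (j + 1)) := by
  rcases h : ps.take j with _ | ⟨y, ys⟩ <;>
    simp [List.take_succ_cons, h, PySem.Chars.join_singleton, PySem.Chars.join_cons_cons]

lemma dsplit_join_take_iff (c : Char) (cs : List Char) : ∀ q,
    (∃ j, 1 ≤ j ∧ j < (dsplit c cs).length ∧ q = PySem.Chars.join [c] ((dsplit c cs).take j))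
      ↔ (q ++ [c]) <+: cs := by
  induction cs with
  | nil =>
    intro q
    constructor
    · rintro ⟨j, h1, h2, _⟩
      simp [dsplit] at h2
      omega
    · intro h
      have := h.length_le
      simp at this
  | cons a rest ih =>
    intro q
    by_cases hac : a = c
    · subst hac
      have hD : dsplit a (a :: rest) = [] :: dsplit a rest := by simp [dsplit]
      rw [hD]
      constructor
      · rintro ⟨j, h1, h2, rfl⟩
        cases j with
        | zero => omega
        | succ k =>
          rw [List.take_succ_cons]
          cases k with
          | zero => simp [PySem.Chars.join_singleton]
          | succ m =>
            have hk2 : m + 1 < (dsplit a rest).length := by simp at h2; omega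
            have hpre : PySem.Chars.join [a] ((dsplit a rest).take (m + 1)) ++ [a] <+: rest :=
              (ih _).mp ⟨m + 1, by omega, hk2, rfl⟩
            rcases htk : (dsplit a rest).take (m + 1) with _ | ⟨y, ys⟩
            · rcases List.take_eq_nil_iff.mp htk with h' | h'
              · omega
              · exact absurd h' (dsplit_ne_nil a rest)
            · rw [htk] at hpre
              rw [PySem.Chars.join_cons_cons, List.nil_append]
              show a :: (PySem.Chars.join [a] (y :: ys) ++ [a]) <+: a :: rest
              exact List.cons_prefix_cons.mpr ⟨rfl, hpre⟩
      · intro h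
        cases q with
        | nil =>
          have hpos : 0 < (dsplit a rest).length :=
            List.length_pos_of_ne_nil (dsplit_ne_nil a rest)
          refine ⟨1, le_rfl, by simp; omega, ?_⟩
          simp [List.take_succ_cons, PySem.Chars.join_singleton]
        | cons b q' =>
          have h' : b = a ∧ q' ++ [a] <+: rest := by
            simpa [List.cons_prefix_cons] using h
          obtain ⟨rfl, h'⟩ := h'
          obtain ⟨k, hk1, hk2, hq⟩ := (ih q').mpr h'
          refine ⟨k + 1, by omega, by simp; omega, ?_⟩
          rw [List.take_succ_cons]
          rcases htk : (dsplit b rest).take k with _ | ⟨y, ys⟩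
          · rcases List.take_eq_nil_iff.mp htk with h'' | h''
            · omega
            · exact absurd h'' (dsplit_ne_nil b rest)
          · rw [PySem.Chars.join_cons_cons, List.nil_append]
            rw [htk] at hq
            simp [hq]
    · rcases hD' : dsplit c rest with _ | ⟨p, ps⟩
      · exact absurd hD' (dsplit_ne_nil c rest)
      have hD : dsplit c (a :: rest) = (a :: p) :: ps := by simp [dsplit, hac, hD']
      rw [hD]
      constructor
      · rintro ⟨j, h1, h2, rfl⟩
        cases j with
        | zero => omega
        | succ k =>
          rw [join_take_cons_cons]
          have hpre : PySem.Chars.join [c] ((p :: ps).take (k + 1)) ++ [c] <+: rest := by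
            have := (ih (PySem.Chars.join [c] ((dsplit c rest).take (k + 1)))).mp
              ⟨k + 1, by omega, by rw [hD']; simpa using h2, rfl⟩
            rwa [hD'] at this
          show a :: (PySem.Chars.join [c] ((p :: ps).take (k + 1)) ++ [c]) <+: a :: rest
          exact List.cons_prefix_cons.mpr ⟨rfl, hpre⟩
      · intro h
        cases q with
        | nil =>
          exfalso
          have hca : c = a := by simpa [List.cons_prefix_cons] using h
          exact hac hca.symm
        | cons b q' =>
          have h' : b = a ∧ q' ++ [c] <+: rest := by
            simpa [List.cons_prefix_cons] using h
          obtain ⟨hb, h'⟩ := h'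
          obtain ⟨k, hk1, hk2, hq⟩ := (ih q').mpr h'
          rw [hD'] at hk2 hq
          cases k with
          | zero => omega
          | succ m =>
            refine ⟨m + 1, by omega, by simpa using hk2, ?_⟩
            rw [join_take_cons_cons, ← hq, hb]

lemma enumerate_fold_mem (t : List Char) : ∀ (cs : List Char) (start : Int)
    (cov : PySem.Set String) (x : String),
    x ∈ (PySem.List.enumerate cs start).foldl (fun cov ic =>
          if ic.2 = '.' then cov.add (String.ofList (PySem.List.slice t none (some ic.1))) else cov)
        cov
      ↔ x ∈ cov ∨ ∃ k, k < cs.length ∧ cs[k]? = some '.'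
          ∧ x = String.ofList (PySem.List.slice t none (some (start + k))) := by
  intro cs
  induction cs with
  | nil => intro start cov x; simp [PySem.List.enumerate_nil]
  | cons ch cs ih =>
    intro start cov x
    rw [PySem.List.enumerate_cons, List.foldl_cons, ih]
    by_cases hch : ch = '.'
    · subst hch
      rw [if_pos (show ((start, '.').2 = '.') from rfl), PySem.Set.mem_add]
      constructor
      · rintro ((hx | rfl) | ⟨k, hk, hget, rfl⟩)
        · exact Or.inl hx
        · exact Or.inr ⟨0, by simp, by simp, by simp⟩
        · refine Or.inr ⟨k + 1, by simp; omega, by simpa using hget, ?_⟩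
          rw [show (start + ((k : Nat) + 1 : Nat) : Int) = start + 1 + k by push_cast; ring]
      · rintro (hx | ⟨k, hk, hget, hx⟩)
        · exact Or.inl (Or.inl hx)
        · cases k with
          | zero =>
            refine Or.inl (Or.inr ?_)
            rw [hx]
            simp
          | succ m =>
            refine Or.inr ⟨m, by simp at hk; omega, by simpa using hget, ?_⟩
            rw [hx, show (start + ((m : Nat) + 1 : Nat) : Int) = start + 1 + m by push_cast; ring]
    · rw [if_neg (show ¬((start, ch).2 = '.') from hch)]
      constructor
      · rintro (hx | ⟨k, hk, hget, rfl⟩)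
        · exact Or.inl hx
        · refine Or.inr ⟨k + 1, by simp; omega, by simpa using hget, ?_⟩
          rw [show (start + ((k : Nat) + 1 : Nat) : Int) = start + 1 + k by push_cast; ring]
      · rintro (hx | ⟨k, hk, hget, hx⟩)
        · exact Or.inl hx
        · cases k with
          | zero =>
            exfalso
            simp at hget
            exact hch hget
          | succ m =>
            refine Or.inr ⟨m, by simp at hk; omega, by simpa using hget, ?_⟩
            rw [hx, show (start + ((m : Nat) + 1 : Nat) : Int) = start + 1 + m by push_cast; ring]

lemma slice_zero_add (t : List Char) (k : Nat) :
    PySem.List.slice t none (some ((0 : Int) + k)) = t.take k := by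
  rw [show ((0 : Int) + k) = (k : Int) by ring, PySem.List.slice_to t (by positivity)]
  simp

lemma mem_covered_aux (sp : List String) : ∀ (cov : PySem.Set String) (x : String),
    x ∈ sp.foldl (fun cov s =>
      ((PySem.List.enumerate s.toList).foldl (fun cov ic =>
          if ic.2 = '.' then cov.add (String.ofList (PySem.List.slice s.toList none (some ic.1))) else cov)
        cov).add s) cov
    ↔ x ∈ cov ∨ ∃ s ∈ sp, x = s ∨ ∃ i, i < s.toList.length ∧ s.toList[i]? = some '.'
        ∧ x = String.ofList (s.toList.take i) := by
  induction sp with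
  | nil => intro cov x; simp
  | cons s rest ih =>
    intro cov x
    rw [List.foldl_cons, ih, PySem.Set.mem_add, enumerate_fold_mem s.toList s.toList 0 cov x]
    simp only [slice_zero_add, List.exists_mem_cons_iff]
    constructor
    · rintro (((hx | hK) | rfl) | hR)
      · exact Or.inl hx
      · exact Or.inr (Or.inl (Or.inr hK))
      · exact Or.inr (Or.inl (Or.inl rfl))
      · exact Or.inr (Or.inr hR)
    · rintro (hx | (rfl | hK) | hR)
      · exact Or.inl (Or.inl (Or.inl hx))
      · exact Or.inl (Or.inr rfl)
      · exact Or.inl (Or.inl (Or.inr hK))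
      · exact Or.inr hR

lemma mem_coveredOf (sp : List String) (x : String) :
    x ∈ coveredOf sp
      ↔ ∃ s ∈ sp, x = s ∨ ∃ i, i < s.toList.length ∧ s.toList[i]? = some '.'
          ∧ x = String.ofList (s.toList.take i) := by
  unfold coveredOf
  rw [mem_covered_aux sp PySem.Set.empty x]
  simp [PySem.Set.empty]

lemma dot_toList : (("." : String)).toList = ['.'] := rfl

lemma join_map_ofList (D : List (List Char)) :
    PySem.Str.join "." (D.map String.ofList)
      = String.ofList (PySem.Chars.join ['.'] D) := by
  rw [← String.toList_inj, PySem.Str.toList_join, String.toList_ofList, List.map_map]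
  congr 1
  simp [Function.comp_def]

lemma pathExistsA_iff (p : String) (sp : List String) :
    pathExistsInSchema p sp = true
      ↔ p ∈ sp ∨ (∃ k ∈ sp, p.toList ++ ['.'] <+: k.toList)
          ∨ (∃ q, q ++ ['.'] <+: p.toList ∧ String.ofList q ∈ sp) := by
  unfold pathExistsInSchema
  cases h1 : sp.contains p with
  | true =>
    have hmem := List.contains_iff_mem.mp h1
    simp [hmem]
  | false =>
    rw [if_neg (by simp)]
    cases h2 : sp.any (fun k => PySem.Str.startswith k (p ++ ".")) with
    | true =>
      rw [if_pos rfl]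
      simp only [true_iff]
      rw [List.any_eq_true] at h2
      obtain ⟨k, hk, hsw⟩ := h2
      refine Or.inr (Or.inl ⟨k, hk, ?_⟩)
      rw [PySem.Str.startswith_eq] at hsw
      have := (PySem.Chars.startswith_iff _ _).mp hsw
      rwa [String.toList_append, dot_toList] at this
    | false =>
      rw [if_neg (by simp)]
      have hnmem : p ∉ sp := fun hm => by
        rw [List.contains_iff_mem.mpr hm] at h1
        exact Bool.noConfusion h1
      have hnsw : ¬ ∃ k ∈ sp, p.toList ++ ['.'] <+: k.toList := by
        rintro ⟨k, hk, hpref⟩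
        have hany : sp.any (fun k => PySem.Str.startswith k (p ++ ".")) = true := by
          rw [List.any_eq_true]
          refine ⟨k, hk, ?_⟩
          rw [PySem.Str.startswith_eq]
          apply (PySem.Chars.startswith_iff _ _).mpr
          rwa [String.toList_append, dot_toList]
        rw [h2] at hany
        exact Bool.noConfusion hany
      constructor
      · intro hany
        rw [List.any_eq_true] at hany
        obtain ⟨i, hi, hc⟩ := hany
        rw [PySem.List.mem_pyRange_one] at hi
        obtain ⟨hi0, hilt⟩ := hi
        rw [List.contains_iff_mem] at hc
        refine Or.inr (Or.inr ?_)
        have hparts : (PySem.Chars.splitOn p.toList ['.']).map String.ofList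
            = (dsplit '.' p.toList).map String.ofList := by rw [splitOn_eq_dsplit]
        rw [hparts] at hc hilt
        have hj : ((i + 1 : Int)).toNat = i.toNat + 1 := by omega
        rw [PySem.List.slice_to _ (by omega), hj, ← List.map_take, join_map_ofList] at hc
        refine ⟨PySem.Chars.join ['.'] ((dsplit '.' p.toList).take (i.toNat + 1)), ?_, hc⟩
        apply (dsplit_join_take_iff '.' p.toList _).mp
        refine ⟨i.toNat + 1, by omega, ?_, rfl⟩
        have hlen : ((dsplit '.' p.toList).map String.ofList).length
            = (dsplit '.' p.toList).length := by simp
        rw [hlen] at hilt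
        omega
      · rintro (hmem | hsw | ⟨q, hpref, hqmem⟩)
        · exact absurd hmem hnmem
        · exact absurd hsw hnsw
        · obtain ⟨j, hj1, hj2, hq⟩ := (dsplit_join_take_iff '.' p.toList q).mpr hpref
          rw [List.any_eq_true]
          refine ⟨(j : Int) - 1, ?_, ?_⟩
          · rw [PySem.List.mem_pyRange_one]
            have hlen : ((PySem.Chars.splitOn p.toList ['.']).map String.ofList).length
                = (dsplit '.' p.toList).length := by rw [splitOn_eq_dsplit]; simp
            rw [hlen]
            omega
          · rw [List.contains_iff_mem]
            have hparts : (PySem.Chars.splitOn p.toList ['.']).map String.ofList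
                = (dsplit '.' p.toList).map String.ofList := by rw [splitOn_eq_dsplit]
            rw [hparts]
            have hj' : ((j : Int) - 1 + 1).toNat = j := by omega
            rw [PySem.List.slice_to _ (by omega), hj', ← List.map_take, join_map_ofList, ← hq]
            exact hqmem

lemma enumerate_any_iff (t : List Char) (sp : List String) : ∀ (cs : List Char) (start : Int),
    (PySem.List.enumerate cs start).any (fun ic =>
        ic.2 == '.' && (PySem.Set.ofList sp).contains (String.ofList (PySem.List.slice t none (some ic.1)))) = true
      ↔ ∃ k, k < cs.length ∧ cs[k]? = some '.'
          ∧ (PySem.Set.ofList sp).contains (String.ofList (PySem.List.slice t none (some (start + k)))) = true := by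
  intro cs
  induction cs with
  | nil => intro start; simp [PySem.List.enumerate_nil]
  | cons ch cs ih =>
    intro start
    rw [PySem.List.enumerate_cons, List.any_cons, Bool.or_eq_true, ih]
    constructor
    · rintro (hhead | ⟨k, hk, hget, hc⟩)
      · rw [Bool.and_eq_true, beq_iff_eq] at hhead
        exact ⟨0, by simp, by simpa using hhead.1, by simpa using hhead.2⟩
      · refine ⟨k + 1, by simp; omega, by simpa using hget, ?_⟩
        rw [show (start + ((k : Nat) + 1 : Nat) : Int) = start + 1 + k by push_cast; ring]
        exact hc
    · rintro ⟨k, hk, hget, hc⟩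
      cases k with
      | zero =>
        left
        rw [Bool.and_eq_true, beq_iff_eq]
        simp only [List.getElem?_cons_zero, Option.some.injEq] at hget
        exact ⟨hget, by simpa using hc⟩
      | succ m =>
        refine Or.inr ⟨m, by simp at hk; omega, by simpa using hget, ?_⟩
        rw [show (start + ((m : Nat) + 1 : Nat) : Int) = start + 1 + m by push_cast; ring] at hc
        exact hc

lemma covered_contains_iff (p : String) (sp : List String) :
    (coveredOf sp).contains p = true
      ↔ p ∈ sp ∨ (∃ k ∈ sp, p.toList ++ ['.'] <+: k.toList) := by
  rw [show ((coveredOf sp).contains p = List.contains (coveredOf sp) p) from rfl,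
    List.contains_iff_mem, mem_coveredOf]
  constructor
  · rintro ⟨s, hs, rfl | ⟨i, hi, hget, hp⟩⟩
    · exact Or.inl hs
    · refine Or.inr ⟨s, hs, ?_⟩
      apply (append_singleton_prefix_iff _ _ _).mpr
      exact ⟨i, hi, hget, by rw [hp, String.toList_ofList]⟩
  · rintro (hmem | ⟨k, hk, hpref⟩)
    · exact ⟨p, hmem, Or.inl rfl⟩
    · obtain ⟨i, hi, hget, hq⟩ := (append_singleton_prefix_iff _ _ _).mp hpref
      refine ⟨k, hk, Or.inr ⟨i, hi, hget, ?_⟩⟩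
      rw [← hq, String.ofList_toList]

lemma parentB_iff (p : String) (sp : List String) :
    (PySem.List.enumerate p.toList).any (fun ic =>
        ic.2 == '.' && (PySem.Set.ofList sp).contains (String.ofList (PySem.List.slice p.toList none (some ic.1)))) = true
      ↔ ∃ q, q ++ ['.'] <+: p.toList ∧ String.ofList q ∈ sp := by
  rw [enumerate_any_iff p.toList sp p.toList 0]
  constructor
  · rintro ⟨k, hk, hget, hc⟩
    rw [slice_zero_add] at hc
    refine ⟨p.toList.take k, ?_, ?_⟩
    · exact (append_singleton_prefix_iff _ _ _).mpr ⟨k, hk, hget, rfl⟩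
    · have := List.contains_iff_mem.mp hc
      rwa [PySem.Set.mem_ofList] at this
  · rintro ⟨q, hpref, hqmem⟩
    obtain ⟨i, hi, hget, rfl⟩ := (append_singleton_prefix_iff _ _ _).mp hpref
    refine ⟨i, hi, hget, ?_⟩
    rw [slice_zero_add]
    rw [show ((PySem.Set.ofList sp).contains (String.ofList (p.toList.take i))
        = List.contains (PySem.Set.ofList sp) (String.ofList (p.toList.take i))) from rfl,
      List.contains_iff_mem, PySem.Set.mem_ofList]
    exact hqmem

lemma pathExists_eq (p : String) (sp : List String) :
    pathExistsInSchema p sp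
      = ((coveredOf sp).contains p
         || (PySem.List.enumerate p.toList).any (fun ic =>
              ic.2 == '.' && (PySem.Set.ofList sp).contains (String.ofList (PySem.List.slice p.toList none (some ic.1))))) := by
  rw [Bool.eq_iff_iff, Bool.or_eq_true, pathExistsA_iff, covered_contains_iff, parentB_iff]
  exact or_assoc.symm

-- ===== VERDICT (by name: the statement is the Claim_ definition above) =====
theorem validate_paths_against_schema_spec : Claim_equal_validate_paths_against_schema := by
  intro paths sp _
  unfold Spec_validate_paths_against_schema validate_paths_against_schema
    validate_paths_against_schema_alt
  dsimp only
  congr 1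
  funext missing p
  rw [pathExists_eq]
  by_cases h0 : (decide (p = "") || PySem.Str.startswith p "$") = true
  · rw [if_pos h0, if_pos h0]
  · rw [if_neg h0, if_neg h0]
    cases hc1 : (coveredOf sp).contains p <;>
    cases hc2 : ((PySem.List.enumerate p.toList).any fun ic =>
        ic.2 == '.' && (PySem.Set.ofList sp).contains (String.ofList (PySem.List.slice p.toList none (some ic.1)))) <;>
      simp [hc1, hc2]
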